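-- pv_equiv track=rewrite | github.com/hoerldavid/codonoptimizer | SeqUtils.py | stripCharsNotInList
-- ===== SOURCE A (Python) =====
-- def stripCharsNotInList(seq, toKeep):
--     charsToReplace = list()
--     for c in seq:
--         if not c in toKeep:
--             charsToReplace.append(c)
--     for c in charsToReplace:
--         seq = seq.replace(c, '')
--     return seq
-- ===== SOURCE B (Python) =====
-- def stripCharsNotInList(seq, toKeep):
--     # single pass: keep exactly the characters that are in toKeep
--     return ''.join(c for c in seq if c in toKeep)
-- ===== Notes on version B (the rewrite author's own statement) =====
-- stated objective: idiomatic
-- what changed: A collects the unwanted characters and then rescans the whole string with one str.replace per collected character; B keeps the wanted characters in a single filtering pass with ''.join.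
import Mathlib
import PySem

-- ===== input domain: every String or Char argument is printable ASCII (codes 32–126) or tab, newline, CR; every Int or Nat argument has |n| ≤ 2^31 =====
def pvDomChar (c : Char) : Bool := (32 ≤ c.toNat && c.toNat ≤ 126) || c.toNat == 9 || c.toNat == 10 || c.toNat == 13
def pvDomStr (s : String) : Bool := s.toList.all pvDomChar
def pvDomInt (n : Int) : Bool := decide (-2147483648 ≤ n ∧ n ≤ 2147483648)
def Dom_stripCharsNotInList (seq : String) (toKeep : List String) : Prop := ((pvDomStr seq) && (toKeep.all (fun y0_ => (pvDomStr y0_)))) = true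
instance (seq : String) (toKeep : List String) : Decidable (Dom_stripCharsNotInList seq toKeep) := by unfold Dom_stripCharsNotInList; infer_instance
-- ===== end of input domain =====

-- B replaces A's collect-the-bad-chars-then-one-str.replace-per-char strategy with a single
-- filtering pass that keeps the wanted characters (idiomatic ''.join + membership test).

-- ===== PORT A =====
def stripCharsNotInList (seq : String) (toKeep : List String) : String :=
  -- charsToReplace = list(); for c in seq: if not c in toKeep: charsToReplace.append(c)
  let charsToReplace : List Char :=
    seq.toList.foldl (fun acc c => if String.ofList [c] ∉ toKeep then acc ++ [c] else acc) []
  -- for c in charsToReplace: seq = seq.replace(c, '')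
  charsToReplace.foldl (fun s c => PySem.Str.replace s (String.ofList [c]) "") seq

-- ===== PORT B =====
def stripCharsNotInList_alt (seq : String) (toKeep : List String) : String :=
  -- ''.join(c for c in seq if c in toKeep)
  String.ofList (seq.toList.filter (fun c => decide (String.ofList [c] ∈ toKeep)))

-- ===== PRECONDITION & SPEC =====
def Spec_stripCharsNotInList (seq : String) (toKeep : List String) (out : String) : Prop := out = stripCharsNotInList_alt seq toKeep
instance (seq : String) (toKeep : List String) (out : String) : Decidable (Spec_stripCharsNotInList seq toKeep out) := by unfold Spec_stripCharsNotInList; infer_instance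

-- ===== CLAIM =====
def Claim_equal_stripCharsNotInList : Prop := ∀ (seq : String) (toKeep : List String), Dom_stripCharsNotInList seq toKeep → Spec_stripCharsNotInList seq toKeep (stripCharsNotInList seq toKeep)

-- ===== LEMMAS AND PROOFS =====

-- the collect loop is a filter
theorem pv_collect (toKeep : List String) (l : List Char) (acc : List Char) :
    l.foldl (fun acc c => if String.ofList [c] ∉ toKeep then acc ++ [c] else acc) acc
      = acc ++ l.filter (fun c => decide (String.ofList [c] ∉ toKeep)) := by
  induction l generalizing acc with
  | nil => simp
  | cons c t ih =>
      rw [List.foldl_cons]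
      by_cases h : String.ofList [c] ∈ toKeep
      · rw [if_neg (not_not_intro h)]
        simpa [List.filter_cons, h] using ih acc
      · rw [if_pos h]
        simpa [List.filter_cons, h] using ih (acc ++ [c])

-- replace.go with a one-character pattern and empty replacement filters that character out
theorem pv_go_single (x : Char) : ∀ (fuel : Nat) (l acc : List Char), l.length ≤ fuel →
    PySem.Chars.replace.go [x] [] fuel l acc = acc.reverse ++ l.filter (fun c => decide (c ≠ x)) := by
  intro fuel
  induction fuel with
  | zero =>
      intro l acc h
      have : l = [] := List.eq_nil_of_length_eq_zero (Nat.le_zero.mp h)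
      subst this
      simp [PySem.Chars.replace.go]
  | succ n ih =>
      intro l acc h
      cases l with
      | nil => simp [PySem.Chars.replace.go]
      | cons c t =>
          have ht : t.length ≤ n := by simpa using Nat.le_of_succ_le_succ h
          simp only [PySem.Chars.replace.go]
          by_cases hc : c = x
          · subst hc
            have hpre : [c].isPrefixOf (c :: t) = true := by
              simp [List.isPrefixOf]
            simp only [hpre, if_true, List.length_cons, List.length_nil, List.drop_succ_cons,
              List.drop_zero, List.reverse_nil, List.nil_append]
            rw [ih t acc ht]
            simp
          · have hpre : [x].isPrefixOf (c :: t) = false := by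
              simp only [List.isPrefixOf, Bool.and_true, beq_eq_false_iff_ne, ne_eq]
              exact fun e => hc e.symm
            simp only [hpre, Bool.false_eq_true, if_false]
            rw [ih t (c :: acc) ht]
            simp [hc]


theorem pv_replace_single (x : Char) (s : List Char) :
    PySem.Chars.replace s [x] [] = s.filter (fun c => decide (c ≠ x)) := by
  rw [PySem.Chars.replace]
  simp only [List.isEmpty_cons, Bool.false_eq_true, if_false]
  simpa using pv_go_single x s.length s [] le_rfl

-- the replace loop filters out every collected character
theorem pv_foldl_replace (L : List Char) : ∀ (s : String),
    (L.foldl (fun s c => PySem.Str.replace s (String.ofList [c]) "") s).toList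
      = s.toList.filter (fun ch => decide (ch ∉ L)) := by
  induction L with
  | nil => intro s; simp
  | cons x t ih =>
      intro s
      rw [List.foldl_cons, ih]
      have h1 : (PySem.Str.replace s (String.ofList [x]) "").toList
          = s.toList.filter (fun c => decide (c ≠ x)) := by
        rw [PySem.Str.toList_replace]
        simpa using pv_replace_single x s.toList
      rw [h1, List.filter_filter]
      apply List.filter_congr
      intro a _
      by_cases hx : a = x <;> simp [hx, List.mem_cons]

-- ===== VERDICT =====
theorem stripCharsNotInList_spec : Claim_equal_stripCharsNotInList := by
  intro seq toKeep _
  unfold Spec_stripCharsNotInList stripCharsNotInList stripCharsNotInList_alt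
  apply String.toList_inj.mp
  rw [pv_foldl_replace, String.toList_ofList, pv_collect]
  simp only [List.nil_append]
  apply List.filter_congr
  intro ch hch
  by_cases hk : String.ofList [ch] ∈ toKeep
  · simp [hk, List.mem_filter]
  · simp [hk, List.mem_filter, hch]
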